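-- pv_equiv track=rewrite | github.com/Donny-GUI/clone-website | main.py | to_basename
-- ===== SOURCE A (Python) =====
-- def to_basename(domain):
--     if domain.startswith("https://www."):
--         dotcount = 0
--         dotswitch = False
--     else:
--         dotswitch = True
--         dotcount = 1
--     base = ""
--     for char in domain:
--         if char == ".":
--             dotswitch = not dotswitch
--             dotcount+=1
--         if dotcount == 2:
--             break
--         if dotswitch:
--             base += char
--     return base
-- ===== SOURCE B (Python) =====
-- def to_basename(domain):
--     head, _, tail = domain.partition(".")
--     if domain.startswith("https://www."):
--         return "." + tail.partition(".")[0]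
--     return head
-- ===== Notes on version B (the rewrite author's own statement) =====
-- stated objective: faster
-- what changed: Replaced A's per-character dotcount/dotswitch state machine (string concatenation in a Python loop) with a direct decomposition via str.partition: the piece before the first dot, or '.' plus the piece between the first and second dot in the 'https://www.' prefix case.
import Mathlib
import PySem

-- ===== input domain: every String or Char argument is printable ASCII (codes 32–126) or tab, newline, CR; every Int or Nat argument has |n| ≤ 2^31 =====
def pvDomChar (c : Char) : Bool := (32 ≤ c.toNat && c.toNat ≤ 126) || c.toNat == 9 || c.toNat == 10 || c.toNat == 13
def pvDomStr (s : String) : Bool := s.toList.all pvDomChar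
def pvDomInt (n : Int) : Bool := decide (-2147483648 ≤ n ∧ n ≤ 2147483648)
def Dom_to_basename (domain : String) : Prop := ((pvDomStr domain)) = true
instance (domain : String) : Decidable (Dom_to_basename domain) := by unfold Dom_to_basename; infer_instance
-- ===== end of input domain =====

-- B replaces A's character-scanning dotcount/dotswitch state machine with a str.partition
-- decomposition (idiomatic); return values agree on every input.


-- ===== PORT A =====
-- the for-loop with its break, over state (dotcount, dotswitch, base)
def toBasenameLoop : List Char → Int → Bool → List Char → List Char
  | [], _, _, base => base
  | c :: rest, dotcount, dotswitch, base =>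
    let dotswitch' := if c = '.' then !dotswitch else dotswitch
    let dotcount' := if c = '.' then dotcount + 1 else dotcount
    if dotcount' = 2 then base
    else toBasenameLoop rest dotcount' dotswitch' (if dotswitch' then base ++ [c] else base)

def to_basename (domain : String) : String :=
  if PySem.Str.startswith domain "https://www." then
    String.ofList (toBasenameLoop domain.toList 0 false [])
  else
    String.ofList (toBasenameLoop domain.toList 1 true [])

-- ===== PORT B =====
-- hand port of str.partition(sep) for a single-character sep (PySem has no partition):
-- exact: (part before first sep, sep if found else "", part after first sep else "")
def pyPartition1 (s : List Char) (sep : Char) : List Char × List Char × List Char :=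
  match s.dropWhile (· ≠ sep) with
  | [] => (s.takeWhile (· ≠ sep), [], [])
  | d :: r => (s.takeWhile (· ≠ sep), [d], r)

def to_basename_alt (domain : String) : String :=
  let (head, _, tail) := pyPartition1 domain.toList '.'
  if PySem.Str.startswith domain "https://www." then
    String.ofList ('.' :: (pyPartition1 tail '.').1)
  else
    String.ofList head

-- ===== PRECONDITION & SPEC =====
def Spec_to_basename (domain : String) (out : String) : Prop := out = to_basename_alt domain
instance (domain : String) (out : String) : Decidable (Spec_to_basename domain out) := by unfold Spec_to_basename; infer_instance

-- ===== CLAIM (what is proved, stated in full; the proofs are below) =====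
def Claim_equal_to_basename : Prop := ∀ (domain : String), Dom_to_basename domain → Spec_to_basename domain (to_basename domain)

-- ===== LEMMAS AND PROOFS =====

-- from state (1, true) the loop copies chars up to (excluding) the first dot, then breaks
theorem toBasenameLoop_one (l : List Char) (base : List Char) :
    toBasenameLoop l 1 true base = base ++ l.takeWhile (· ≠ '.') := by
  induction l generalizing base with
  | nil => simp [toBasenameLoop]
  | cons c rest ih =>
    by_cases hc : c = '.'
    · subst hc; simp [toBasenameLoop, List.takeWhile]
    · simp [toBasenameLoop, hc, List.takeWhile, ih]

-- from state (0, false) the loop skips to the first dot, emits it, then behaves as (1, true)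
theorem toBasenameLoop_zero (l : List Char) (base : List Char) :
    toBasenameLoop l 0 false base =
      base ++ (match l.dropWhile (· ≠ '.') with
               | [] => []
               | _ :: r => '.' :: r.takeWhile (· ≠ '.')) := by
  induction l generalizing base with
  | nil => simp [toBasenameLoop]
  | cons c rest ih =>
    by_cases hc : c = '.'
    · subst hc
      simp [toBasenameLoop, List.dropWhile, toBasenameLoop_one]
    · simp [toBasenameLoop, hc, List.dropWhile, ih]

theorem dot_mem_of_startswith (domain : String)
    (h : PySem.Str.startswith domain "https://www." = true) :
    '.' ∈ domain.toList := by
  rw [PySem.Str.startswith_eq, PySem.Chars.startswith_iff] at h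
  obtain ⟨t, ht⟩ := h
  rw [← ht]
  exact List.mem_append_left _ (by decide)

-- ===== VERDICT (by name: the statement is the Claim_ definition above) =====
theorem to_basename_spec : Claim_equal_to_basename := by
  intro domain _
  unfold Spec_to_basename to_basename to_basename_alt
  by_cases hsw : PySem.Str.startswith domain "https://www." = true
  · rw [hsw]
    have hmem := dot_mem_of_startswith domain hsw
    rcases hd : domain.toList.dropWhile (fun x => !decide (x = '.')) with _ | ⟨d, r⟩
    · exfalso
      have := List.dropWhile_eq_nil_iff.mp hd '.' hmem
      simp at this
    · simp [toBasenameLoop_zero, pyPartition1, hd]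
      cases _h2 : List.dropWhile (fun x => !decide (x = '.')) r <;> simp
  · rw [Bool.not_eq_true] at hsw
    rw [hsw]
    simp [toBasenameLoop_one, pyPartition1]
    cases _h2 : List.dropWhile (fun x => !decide (x = '.')) domain.toList <;> simp
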